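-- pv_equiv track=rewrite | github.com/MartialTarizzo/calisson | html_calisson.py | make_tab_segments
-- ===== SOURCE A (Python) =====
-- def make_tab_segments(taille=3):
--     """
--     retourne la liste de tous les segments traçables avec la syntaxe utilisée pour l'encodage
--     des énigmes.
--
--     Le code de cette fonction reprend du code contenu dans le fichier javascript
--     traçant les différents segments de la figure.
--     (voir la fonction  miseajourpointencours de javascript.js par exemple)
--
--     La liste est dans l'ordre du tracé des segments dans le code JS : ceci est important
--     car le programme web se sert de la position dans une chaîne pour connaître le status
--     d'une arête
--     """
--     # Les coordonnées javascript sont avec origine en haut et axe y vers le bas.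
--     # le codage des coordonnées pour mes fonctions est avec origine au centre et axe y vers le haut
--     # cette fonction effectue la transformation js -> python
--     def transf_coord(tab):
--         for p in tab:
--             p[0][1] = 2*taille - p[0][1]
--             p[1][1] = 2*taille - p[1][1]
--
--     tabsegment = []
--
--     # tout ce qui suit n'est qu'une reprise du code JS avec simplifications
--     # car des variables sont inutiles (constamment nulles ...),
--     # et mes coordonnées sont entières
--
--     # partie gauche
--     for j in range(2*taille):
--         for i in range(min(taille+1, 2*taille-j)):
--             if j>0 and i<taille:
--                 tabsegment.append([[-i, i + 2*j],
--                             [-(i + 1), (i + 1) + 2*j]])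
--             if i<taille:
--                 tabsegment.append([[-i,  i  + 2*j],
--                             [ -i, i + 2*(j+1)]])
--             if i>0:
--                 tabsegment.append([[-i, i  + 2*j],
--                             [-i + 1, i + 2*j + 1]])
--     # partie droite sans la ligne verticale x==0
--     for j in range(2 * taille):
--             for k in range(min(taille + 1, 2 * taille - j)):
--                 if ((j > 0) and (k < taille)):
--                     tabsegment.append([[ -i + k,2*j + k],
--                         [(k + 1),  2*j + (k + 1)]])
--                 if ((k < taille) and (k > 0)):
--                     tabsegment.append([[k,  2*j + k],
--                         [ k,  2*(j + 1) + k]])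
--                 if (k > 0):
--                     tabsegment.append([[ k, 2*j + k],
--                         [-1 + k, 1 + 2*j + k]])
--
--     # tabsegment est maintenant une liste de segments, chaque segment est de la
--     # forme [A,B], A et B étant des points, donc des listes de la forme [x, y]
--     # dans le système de coordonnées JS.
--
--     # on passe en coordonnées Python en modifiant tabsegment
--     transf_coord(tabsegment)
--
--     # on va maintenant transformer chaque segment pour passer dans la même syntaxe
--     # que celle utilisée pour l'encodage Python des énigmes (X, Y, direction)
--
--     l = [] # la liste résultat qui sera rendue par la fonction
--     for cp in tabsegment: # pour chaque segment <-> couple de points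
--         A, B = cp[0], cp[1]
--         if A[0]==B[0]: # segment selon z, l'origine est le point le plus bas
--             if A[1]>B[1]:
--                 l.append(tuple(B + ["z"]))
--             else:
--                 l.append(tuple(A + [ "z"]))
--
--         elif (A[0]-B[0])*(A[1]-B[1]) > 0: # segment selon x, origine la plus à droite
--             if A[0]<B[0]:
--                 l.append(tuple(B + ["x"]))
--             else:
--                 l.append(tuple(A + ["x"]))
--         else: # segment selon y, origine la plus à gauche
--             if A[0]<B[0]:
--                 l.append(tuple(A + ["y"]))
--             else:
--                 l.append(tuple(B + ["y"]))
--     # C'est fini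
--     return l
-- ===== SOURCE B (Python) =====
-- def make_tab_segments(taille=3):
--     # Emits (X, Y, direction) tuples directly in JS drawing order,
--     # with the y-flip and direction classification precomputed per branch.
--     T = taille
--     l = []
--     for j in range(2 * T):
--         for i in range(min(T + 1, 2 * T - j)):
--             y = 2 * T - i - 2 * j
--             if j > 0 and i < T:
--                 l.append((-i, y, "x"))
--             if i < T:
--                 l.append((-i, y - 2, "z"))
--             if i > 0:
--                 l.append((-i, y, "y"))
--     for j in range(2 * T):
--         for k in range(min(T + 1, 2 * T - j)):
--             y = 2 * T - 2 * j - k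
--             if j > 0 and k < T:
--                 l.append((k, y, "y"))
--             if 0 < k < T:
--                 l.append((k, y - 2, "z"))
--             if k > 0:
--                 l.append((k, y, "x"))
--     return l
-- ===== Notes on version B (the rewrite author's own statement) =====
-- stated objective: simpler
-- what changed: B emits the final (X, Y, direction) tuples directly inside the two double loops, with the y-flip and per-branch direction/origin precomputed, removing the intermediate point-pair list, the transf_coord mutation pass and the final classification loop.
import Mathlib
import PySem

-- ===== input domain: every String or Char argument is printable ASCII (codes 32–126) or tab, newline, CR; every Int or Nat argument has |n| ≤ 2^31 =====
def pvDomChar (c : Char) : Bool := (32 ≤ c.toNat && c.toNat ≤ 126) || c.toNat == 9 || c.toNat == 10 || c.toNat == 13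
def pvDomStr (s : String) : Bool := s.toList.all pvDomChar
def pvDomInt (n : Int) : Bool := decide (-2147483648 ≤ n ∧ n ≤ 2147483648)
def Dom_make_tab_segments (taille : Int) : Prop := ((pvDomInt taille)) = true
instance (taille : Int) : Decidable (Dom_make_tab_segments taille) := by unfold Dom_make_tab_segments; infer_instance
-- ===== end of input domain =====

-- B emits the final (X, Y, direction) tuples directly per loop branch (y-flip and
-- direction/origin precomputed), dropping A's point-pair list, transf_coord pass and
-- classification loop; equivalence of the return values is proved for every taille.

-- ===== PORT A =====
-- inner body of the left loop; the fold state is (tabsegment, i) since Python's loop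
-- variable i is read again in the right loop
def pvLeftInner (taille j : Int)
    (st : List ((Int × Int) × (Int × Int)) × Int) (i : Int) :
    List ((Int × Int) × (Int × Int)) × Int :=
  let tab := st.1
  let tab := if j > 0 ∧ i < taille then
      tab ++ [((-i, i + 2*j), (-(i + 1), (i + 1) + 2*j))] else tab
  let tab := if i < taille then
      tab ++ [((-i, i + 2*j), (-i, i + 2*(j + 1)))] else tab
  let tab := if i > 0 then
      tab ++ [((-i, i + 2*j), (-i + 1, i + 2*j + 1))] else tab
  (tab, i)

-- inner body of the right loop; i is the leftover value of the left loop's variable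
def pvRightInner (taille i j : Int)
    (tab : List ((Int × Int) × (Int × Int))) (k : Int) :
    List ((Int × Int) × (Int × Int)) :=
  let tab := if j > 0 ∧ k < taille then
      tab ++ [((-i + k, 2*j + k), (k + 1, 2*j + (k + 1)))] else tab
  let tab := if k < taille ∧ k > 0 then
      tab ++ [((k, 2*j + k), (k, 2*(j + 1) + k))] else tab
  let tab := if k > 0 then
      tab ++ [((k, 2*j + k), (-1 + k, 1 + 2*j + k))] else tab
  tab

-- transf_coord's per-element mutation (in-place loop ported as a map)
def pvTransf (taille : Int) (p : (Int × Int) × (Int × Int)) : (Int × Int) × (Int × Int) :=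
  ((p.1.1, 2*taille - p.1.2), (p.2.1, 2*taille - p.2.2))

-- body of the final classification loop
def pvClassify (cp : (Int × Int) × (Int × Int)) : Int × Int × String :=
  let A := cp.1
  let B := cp.2
  if A.1 = B.1 then
    if A.2 > B.2 then (B.1, B.2, "z") else (A.1, A.2, "z")
  else if (A.1 - B.1) * (A.2 - B.2) > 0 then
    if A.1 < B.1 then (B.1, B.2, "x") else (A.1, A.2, "x")
  else
    if A.1 < B.1 then (A.1, A.2, "y") else (B.1, B.2, "y")

def make_tab_segments (taille : Int) : List (Int × Int × String) :=
  -- i initialised to 0 in the state: Python leaves i unbound only when both loops are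
  -- empty (taille ≤ 0) and it is then never read
  let st := (PySem.List.pyRange 0 (2*taille) 1).foldl
    (fun st j => (PySem.List.pyRange 0 (min (taille + 1) (2*taille - j)) 1).foldl
      (pvLeftInner taille j) st) ([], 0)
  let tab := (PySem.List.pyRange 0 (2*taille) 1).foldl
    (fun tab j => (PySem.List.pyRange 0 (min (taille + 1) (2*taille - j)) 1).foldl
      (pvRightInner taille st.2 j) tab) st.1
  let tab2 := tab.map (pvTransf taille)
  tab2.foldl (fun l cp => l ++ [pvClassify cp]) []

-- ===== PORT B =====
def pvAltLeft (taille j : Int) (l : List (Int × Int × String)) (i : Int) :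
    List (Int × Int × String) :=
  let y := 2*taille - i - 2*j
  let l := if j > 0 ∧ i < taille then l ++ [(-i, y, "x")] else l
  let l := if i < taille then l ++ [(-i, y - 2, "z")] else l
  let l := if i > 0 then l ++ [(-i, y, "y")] else l
  l

def pvAltRight (taille j : Int) (l : List (Int × Int × String)) (k : Int) :
    List (Int × Int × String) :=
  let y := 2*taille - 2*j - k
  let l := if j > 0 ∧ k < taille then l ++ [(k, y, "y")] else l
  let l := if 0 < k ∧ k < taille then l ++ [(k, y - 2, "z")] else l
  let l := if k > 0 then l ++ [(k, y, "x")] else l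
  l

def make_tab_segments_alt (taille : Int) : List (Int × Int × String) :=
  let l := (PySem.List.pyRange 0 (2*taille) 1).foldl
    (fun l j => (PySem.List.pyRange 0 (min (taille + 1) (2*taille - j)) 1).foldl
      (pvAltLeft taille j) l) []
  (PySem.List.pyRange 0 (2*taille) 1).foldl
    (fun l j => (PySem.List.pyRange 0 (min (taille + 1) (2*taille - j)) 1).foldl
      (pvAltRight taille j) l) l

-- ===== PRECONDITION & SPEC =====
def Spec_make_tab_segments (taille : Int) (out : List (Int × Int × String)) : Prop := out = make_tab_segments_alt taille
instance (taille : Int) (out : List (Int × Int × String)) : Decidable (Spec_make_tab_segments taille out) := by unfold Spec_make_tab_segments; infer_instance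

-- ===== CLAIM (what is proved, stated in full; the proofs are below) =====
def Claim_equal_make_tab_segments : Prop := ∀ (taille : Int), Dom_make_tab_segments taille → Spec_make_tab_segments taille (make_tab_segments taille)

-- ===== LEMMAS AND PROOFS =====
lemma pv_h1 (T j i : Int) : pvClassify (pvTransf T ((-i, i + 2*j), (-(i + 1), (i + 1) + 2*j))) = (-i, 2*T - i - 2*j, "x") := by
  simp only [pvClassify, pvTransf]
  rw [if_neg (by omega), if_pos (by nlinarith), if_neg (by omega)]
  norm_num; omega

lemma pv_h2 (T j i : Int) : pvClassify (pvTransf T ((-i, i + 2*j), (-i, i + 2*(j + 1)))) = (-i, 2*T - i - 2*j - 2, "z") := by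
  simp only [pvClassify, pvTransf]
  rw [if_pos trivial, if_pos (by omega)]
  norm_num; omega

lemma pv_h3 (T j i : Int) : pvClassify (pvTransf T ((-i, i + 2*j), (-i + 1, i + 2*j + 1))) = (-i, 2*T - i - 2*j, "y") := by
  simp only [pvClassify, pvTransf]
  rw [if_neg (by omega), if_neg (by intro h; nlinarith), if_pos (by omega)]
  norm_num; omega

lemma pv_h4 (T j k : Int) : pvClassify (pvTransf T ((k, 2*j + k), (k + 1, 2*j + (k + 1)))) = (k, 2*T - 2*j - k, "y") := by
  simp only [pvClassify, pvTransf]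
  rw [if_neg (by omega), if_neg (by intro h; nlinarith), if_pos (by omega)]
  norm_num; omega

lemma pv_h5 (T j k : Int) : pvClassify (pvTransf T ((k, 2*j + k), (k, 2*(j + 1) + k))) = (k, 2*T - 2*j - k - 2, "z") := by
  simp only [pvClassify, pvTransf]
  rw [if_pos trivial, if_pos (by omega)]
  norm_num; omega

lemma pv_h6 (T j k : Int) : pvClassify (pvTransf T ((k, 2*j + k), (-1 + k, 1 + 2*j + k))) = (k, 2*T - 2*j - k, "x") := by
  simp only [pvClassify, pvTransf]
  rw [if_neg (by omega), if_pos (by nlinarith), if_neg (by omega)]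
  norm_num; omega

lemma pv_left_step (T j : Int) (st : List ((Int × Int) × (Int × Int)) × Int) (i : Int) :
    ((pvLeftInner T j st i).1).map (fun cp => pvClassify (pvTransf T cp)) =
    pvAltLeft T j (st.1.map (fun cp => pvClassify (pvTransf T cp))) i := by
  simp only [pvLeftInner, pvAltLeft]
  split_ifs <;>
    simp only [List.map_append, List.map_cons, List.map_nil, pv_h1, pv_h2, pv_h3]

lemma pv_right_step (T j : Int) (tab : List ((Int × Int) × (Int × Int))) (k : Int) :
    (pvRightInner T 0 j tab k).map (fun cp => pvClassify (pvTransf T cp)) =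
    pvAltRight T j (tab.map (fun cp => pvClassify (pvTransf T cp))) k := by
  simp only [pvRightInner, pvAltRight, neg_zero, zero_add]
  split_ifs <;> first
    | omega
    | simp only [List.map_append, List.map_cons, List.map_nil, pv_h4, pv_h5, pv_h6]

lemma pv_left_inner_fold (T j : Int) (K : List Int) :
    ∀ st : List ((Int × Int) × (Int × Int)) × Int,
    ((K.foldl (pvLeftInner T j) st).1).map (fun cp => pvClassify (pvTransf T cp)) =
    K.foldl (pvAltLeft T j) (st.1.map (fun cp => pvClassify (pvTransf T cp))) := by
  induction K with
  | nil => intro st; rfl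
  | cons x xs ih => intro st; simp only [List.foldl_cons]; rw [ih, pv_left_step]

lemma pv_right_inner_fold (T j : Int) (K : List Int) :
    ∀ tab : List ((Int × Int) × (Int × Int)),
    ((K.foldl (pvRightInner T 0 j) tab)).map (fun cp => pvClassify (pvTransf T cp)) =
    K.foldl (pvAltRight T j) (tab.map (fun cp => pvClassify (pvTransf T cp))) := by
  induction K with
  | nil => intro tab; rfl
  | cons x xs ih => intro tab; simp only [List.foldl_cons]; rw [ih, pv_right_step]

lemma pv_left_fold (T : Int) (L : List Int) :
    ∀ st : List ((Int × Int) × (Int × Int)) × Int,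
    ((L.foldl (fun st j => (PySem.List.pyRange 0 (min (T + 1) (2*T - j)) 1).foldl (pvLeftInner T j) st) st).1).map
      (fun cp => pvClassify (pvTransf T cp)) =
    L.foldl (fun l j => (PySem.List.pyRange 0 (min (T + 1) (2*T - j)) 1).foldl (pvAltLeft T j) l)
      (st.1.map (fun cp => pvClassify (pvTransf T cp))) := by
  induction L with
  | nil => intro st; rfl
  | cons x xs ih => intro st; simp only [List.foldl_cons]; rw [ih, pv_left_inner_fold]

lemma pv_right_fold (T : Int) (L : List Int) :
    ∀ tab : List ((Int × Int) × (Int × Int)),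
    ((L.foldl (fun tab j => (PySem.List.pyRange 0 (min (T + 1) (2*T - j)) 1).foldl (pvRightInner T 0 j) tab) tab)).map
      (fun cp => pvClassify (pvTransf T cp)) =
    L.foldl (fun l j => (PySem.List.pyRange 0 (min (T + 1) (2*T - j)) 1).foldl (pvAltRight T j) l)
      (tab.map (fun cp => pvClassify (pvTransf T cp))) := by
  induction L with
  | nil => intro tab; rfl
  | cons x xs ih => intro tab; simp only [List.foldl_cons]; rw [ih, pv_right_inner_fold]

lemma pv_left_inner_snd (T j : Int) (K : List Int) :
    ∀ st : List ((Int × Int) × (Int × Int)) × Int,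
    (K.foldl (pvLeftInner T j) st).2 = K.getLastD st.2 := by
  induction K with
  | nil => intro st; rfl
  | cons x xs ih => intro st; simp only [List.foldl_cons, List.getLastD_cons]; rw [ih]; rfl

lemma pv_left_snd (T : Int) (hT : 1 ≤ T) :
    ((PySem.List.pyRange 0 (2*T) 1).foldl
      (fun st j => (PySem.List.pyRange 0 (min (T + 1) (2*T - j)) 1).foldl (pvLeftInner T j) st)
      (([], 0) : List ((Int × Int) × (Int × Int)) × Int)).2 = 0 := by
  rw [show (2*T : Int) = (2*T - 1) + 1 by ring,
      PySem.List.pyRange_one_succ_right (by omega), List.foldl_append]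
  simp only [List.foldl_cons, List.foldl_nil]
  rw [show (min (T + 1) (2*T - 1 + 1 - (2*T - 1)) : Int) = 1 by omega,
      show (PySem.List.pyRange 0 1 1) = [0] by decide]
  rw [pv_left_inner_snd]
  rfl


-- ===== VERDICT (by name: the statement is the Claim_ definition above) =====
theorem make_tab_segments_spec : Claim_equal_make_tab_segments := by
  intro T _
  unfold Spec_make_tab_segments
  by_cases hT : T ≤ 0
  · simp [make_tab_segments, make_tab_segments_alt,
      PySem.List.pyRange_one_eq_nil (show (2*T : Int) ≤ 0 by omega)]
  · simp only [make_tab_segments, make_tab_segments_alt]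
    rw [pv_left_snd T (by omega)]
    rw [PySem.List.foldl_append_singleton_eq_map, List.map_map, List.nil_append]
    rw [show (pvClassify ∘ pvTransf T) = (fun cp => pvClassify (pvTransf T cp)) from rfl]
    rw [pv_right_fold, pv_left_fold]
    rfl
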